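-- pv_equiv track=rewrite | github.com/liamonpulsesolutions/exit-ready-snapshot | workflow/core/response_miner.py | _categorize_phrase
-- ===== SOURCE A (Python) =====
-- def _categorize_phrase(phrase: str) -> str:
--     """Categorize the type of memorable phrase."""
--     phrase_lower = phrase.lower()
--
--     if any(word in phrase_lower for word in ['reputation', 'trusted', 'relationship']):
--         return "reputation"
--     elif any(word in phrase_lower for word in ['quality', 'precision', 'standard']):
--         return "quality"
--     elif any(word in phrase_lower for word in ['only', 'first', 'exclusive']):
--         return "uniqueness"
--     elif any(word in phrase_lower for word in ['year', 'decade', 'established']):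
--         return "heritage"
--     else:
--         return "general"
-- ===== SOURCE B (Python) =====
-- _KEYWORD_TO_CATEGORY = {
--     'reputation': 'reputation', 'trusted': 'reputation', 'relationship': 'reputation',
--     'quality': 'quality', 'precision': 'quality', 'standard': 'quality',
--     'only': 'uniqueness', 'first': 'uniqueness', 'exclusive': 'uniqueness',
--     'year': 'heritage', 'decade': 'heritage', 'established': 'heritage',
-- }
--
-- _PRIORITY = ('reputation', 'quality', 'uniqueness', 'heritage')
--
--
-- def _categorize_phrase(phrase: str) -> str:
--     """Single left-to-right scan: collect every category whose keyword starts at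
--     some position, then resolve by fixed priority."""
--     p = phrase.lower()
--     found = set()
--     for i in range(len(p)):
--         for kw, cat in _KEYWORD_TO_CATEGORY.items():
--             if p.startswith(kw, i):
--                 found.add(cat)
--     for cat in _PRIORITY:
--         if cat in found:
--             return cat
--     return 'general'
-- ===== Notes on version B (the rewrite author's own statement) =====
-- stated objective: alternative
-- what changed: Replaced the branch chain of per-category any()-substring tests (each keyword rescans the whole phrase) with a single left-to-right scan over positions that collects, via startswith at each offset, the set of matched categories, resolved afterwards by a fixed priority order.
import Mathlib
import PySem

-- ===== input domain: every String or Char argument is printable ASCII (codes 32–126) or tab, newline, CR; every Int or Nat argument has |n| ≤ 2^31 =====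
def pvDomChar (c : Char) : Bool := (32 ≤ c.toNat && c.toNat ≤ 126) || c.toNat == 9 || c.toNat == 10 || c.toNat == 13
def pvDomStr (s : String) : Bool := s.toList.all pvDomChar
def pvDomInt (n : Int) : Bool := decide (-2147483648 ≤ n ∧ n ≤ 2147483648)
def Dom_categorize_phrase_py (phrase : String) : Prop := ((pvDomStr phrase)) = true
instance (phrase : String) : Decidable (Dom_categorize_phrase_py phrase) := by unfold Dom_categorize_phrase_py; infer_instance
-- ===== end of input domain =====

-- B replaces A's branch chain of per-category substring tests by a single positional scan
-- collecting matched categories into a set, resolved by a fixed priority order (objective: alternative).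

-- ===== PORT A =====
def categorize_phrase_py (phrase : String) : String :=
  let phrase_lower := PySem.Str.lower phrase
  if (["reputation", "trusted", "relationship"].any fun w => PySem.Str.isIn w phrase_lower) then "reputation"
  else if (["quality", "precision", "standard"].any fun w => PySem.Str.isIn w phrase_lower) then "quality"
  else if (["only", "first", "exclusive"].any fun w => PySem.Str.isIn w phrase_lower) then "uniqueness"
  else if (["year", "decade", "established"].any fun w => PySem.Str.isIn w phrase_lower) then "heritage"
  else "general"

-- ===== PORT B =====
def pvKeywordTable : List (List Char × String) :=
  [("reputation".toList, "reputation"), ("trusted".toList, "reputation"), ("relationship".toList, "reputation"),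
   ("quality".toList, "quality"), ("precision".toList, "quality"), ("standard".toList, "quality"),
   ("only".toList, "uniqueness"), ("first".toList, "uniqueness"), ("exclusive".toList, "uniqueness"),
   ("year".toList, "heritage"), ("decade".toList, "heritage"), ("established".toList, "heritage")]

-- the `found` set built by Source B's double loop (positions × keyword table)
def pvFound (p : List Char) : PySem.Set String :=
  (List.range p.length).foldl
    (fun acc i => pvKeywordTable.foldl
      (fun acc kc => if PySem.Chars.startswith (p.drop i) kc.1 then PySem.Set.add acc kc.2 else acc) acc)
    PySem.Set.empty

def categorize_phrase_py_alt (phrase : String) : String :=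
  let p := (PySem.Str.lower phrase).toList
  let found := pvFound p
  match ["reputation", "quality", "uniqueness", "heritage"].find? (fun cat => PySem.Set.contains found cat) with
  | some cat => cat
  | none => "general"

-- ===== PRECONDITION & SPEC =====
def Spec_categorize_phrase_py (phrase : String) (out : String) : Prop := out = categorize_phrase_py_alt phrase
instance (phrase : String) (out : String) : Decidable (Spec_categorize_phrase_py phrase out) := by unfold Spec_categorize_phrase_py; infer_instance

-- ===== CLAIM (what is proved, stated in full; the proofs are below) =====
def Claim_equal_categorize_phrase_py : Prop := ∀ (phrase : String), Dom_categorize_phrase_py phrase → Spec_categorize_phrase_py phrase (categorize_phrase_py phrase)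

-- ===== LEMMAS AND PROOFS =====

-- keyword occurs as a substring iff it starts at some position of the scan
theorem pv_isIn_iff_any (kw s : List Char) (h : kw ≠ []) :
    PySem.Chars.isIn kw s = true ↔ ∃ i < s.length, PySem.Chars.startswith (s.drop i) kw = true := by
  simp only [PySem.Chars.isIn_iff_infix, PySem.Chars.startswith_iff]
  constructor
  · rintro ⟨t1, t2, rfl⟩
    have hk : 0 < kw.length := List.length_pos_iff.mpr h
    exact ⟨t1.length, by simp; omega, by simp⟩
  · rintro ⟨i, hi, hp⟩
    exact hp.isInfix.trans (List.drop_suffix i s).isInfix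

-- membership in the inner fold over the keyword table
theorem pv_mem_inner (l : List (List Char × String)) (acc : PySem.Set String)
    (g : List Char → Bool) (x : String) :
    x ∈ l.foldl (fun acc kc => if g kc.1 then PySem.Set.add acc kc.2 else acc) acc ↔
      x ∈ acc ∨ ∃ kc ∈ l, g kc.1 = true ∧ kc.2 = x := by
  induction l generalizing acc with
  | nil => simp
  | cons a t ih =>
    by_cases hg : g a.1 = true
    · simp [List.foldl_cons, hg, ih, PySem.Set.mem_add]
      tauto
    · simp [List.foldl_cons, hg, ih]

-- membership in the outer fold over positions
theorem pv_mem_outer (idxs : List Nat) (p : List Char) (acc : PySem.Set String) (x : String) :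
    x ∈ idxs.foldl
        (fun acc i => pvKeywordTable.foldl
          (fun acc kc => if PySem.Chars.startswith (p.drop i) kc.1 then PySem.Set.add acc kc.2 else acc) acc)
        acc ↔
      x ∈ acc ∨ ∃ i ∈ idxs, ∃ kc ∈ pvKeywordTable, PySem.Chars.startswith (p.drop i) kc.1 = true ∧ kc.2 = x := by
  induction idxs generalizing acc with
  | nil => simp
  | cons a t ih => rw [List.foldl_cons, ih, pv_mem_inner]; simp only [List.mem_cons, exists_eq_or_imp]; exact or_assoc

-- every keyword in the table is nonempty
theorem pv_table_ne : ∀ kc ∈ pvKeywordTable, kc.1 ≠ [] := by decide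

-- the collected set contains a category iff one of its keywords occurs in p
theorem pv_contains_found (p : List Char) (x : String) :
    PySem.Set.contains (pvFound p) x
      = pvKeywordTable.any (fun kc => (kc.2 == x) && PySem.Chars.isIn kc.1 p) := by
  rw [Bool.eq_iff_iff, PySem.Set.contains_iff]
  unfold pvFound
  rw [pv_mem_outer]
  constructor
  · rintro (h | ⟨i, hi, kc, hkc, hs, rfl⟩)
    · exact absurd h (by simp [PySem.Set.empty])
    · rw [List.any_eq_true]
      refine ⟨kc, hkc, ?_⟩
      simp only [Bool.and_eq_true, beq_iff_eq]
      exact ⟨trivial, (pv_isIn_iff_any kc.1 p (pv_table_ne kc hkc)).mpr ⟨i, List.mem_range.mp hi, hs⟩⟩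
  · rw [List.any_eq_true]
    rintro ⟨kc, hkc, hb⟩
    simp only [Bool.and_eq_true, beq_iff_eq] at hb
    obtain ⟨i, hi, hs⟩ := (pv_isIn_iff_any kc.1 p (pv_table_ne kc hkc)).mp hb.2
    exact Or.inr ⟨i, List.mem_range.mpr hi, kc, hkc, hs, hb.1⟩

-- ===== VERDICT (by name: the statement is the Claim_ definition above) =====
set_option maxHeartbeats 1000000 in
theorem categorize_phrase_py_spec : Claim_equal_categorize_phrase_py := by
  intro phrase _
  unfold Spec_categorize_phrase_py categorize_phrase_py categorize_phrase_py_alt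
  simp only [pv_contains_found, pvKeywordTable, List.any_cons, List.any_nil,
    List.find?, PySem.Str.isIn_eq, PySem.Str.toList_lower, Bool.or_false]
  set p := PySem.Chars.lower phrase.toList
  cases hb1 : (PySem.Chars.isIn ['r', 'e', 'p', 'u', 't', 'a', 't', 'i', 'o', 'n'] p || (PySem.Chars.isIn ['t', 'r', 'u', 's', 't', 'e', 'd'] p || PySem.Chars.isIn ['r', 'e', 'l', 'a', 't', 'i', 'o', 'n', 's', 'h', 'i', 'p'] p)) <;>
  cases hb2 : (PySem.Chars.isIn ['q', 'u', 'a', 'l', 'i', 't', 'y'] p || (PySem.Chars.isIn ['p', 'r', 'e', 'c', 'i', 's', 'i', 'o', 'n'] p || PySem.Chars.isIn ['s', 't', 'a', 'n', 'd', 'a', 'r', 'd'] p)) <;>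
  cases hb3 : (PySem.Chars.isIn ['o', 'n', 'l', 'y'] p || (PySem.Chars.isIn ['f', 'i', 'r', 's', 't'] p || PySem.Chars.isIn ['e', 'x', 'c', 'l', 'u', 's', 'i', 'v', 'e'] p)) <;>
  cases hb4 : (PySem.Chars.isIn ['y', 'e', 'a', 'r'] p || (PySem.Chars.isIn ['d', 'e', 'c', 'a', 'd', 'e'] p || PySem.Chars.isIn ['e', 's', 't', 'a', 'b', 'l', 'i', 's', 'h', 'e', 'd'] p)) <;>
  simp [hb1, hb2, hb3, hb4]
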